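-- pv_equiv track=rewrite | github.com/uscnlp-lime/Inter-Intent | avalon_evaluation.py | min_context_for_intent_summarization
-- ===== SOURCE A (Python) =====
-- def min_context_for_intent_summarization(context, inc_discussion=False):
--     lines = context.split('\n')
--
--     rs = []
--     for line in lines:
--         if line.startswith('**Other Players**:'):
--             continue
--         if not inc_discussion and line.startswith('**Previous Discussions'):
--             break
--         rs.append(line)
--     return '\n'.join(rs)
-- ===== SOURCE B (Python) =====
-- def min_context_for_intent_summarization(context, inc_discussion=False):
--     lines = context.split('\n')
--     if not inc_discussion:
--         # truncate at the first '**Previous Discussions' boundary line (excluded)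
--         for i, line in enumerate(lines):
--             if line.startswith('**Previous Discussions'):
--                 lines = lines[:i]
--                 break
--     return '\n'.join(l for l in lines if not l.startswith('**Other Players**:'))
-- ===== Notes on version B (the rewrite author's own statement) =====
-- stated objective: alternative
-- what changed: Replaces A's single accumulate-with-continue/break loop by a two-pass form: first truncate the line list at the first '**Previous Discussions' boundary (find-index-and-slice, only when inc_discussion is False), then filter out '**Other Players**:' lines with a comprehension and join.
import Mathlib
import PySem

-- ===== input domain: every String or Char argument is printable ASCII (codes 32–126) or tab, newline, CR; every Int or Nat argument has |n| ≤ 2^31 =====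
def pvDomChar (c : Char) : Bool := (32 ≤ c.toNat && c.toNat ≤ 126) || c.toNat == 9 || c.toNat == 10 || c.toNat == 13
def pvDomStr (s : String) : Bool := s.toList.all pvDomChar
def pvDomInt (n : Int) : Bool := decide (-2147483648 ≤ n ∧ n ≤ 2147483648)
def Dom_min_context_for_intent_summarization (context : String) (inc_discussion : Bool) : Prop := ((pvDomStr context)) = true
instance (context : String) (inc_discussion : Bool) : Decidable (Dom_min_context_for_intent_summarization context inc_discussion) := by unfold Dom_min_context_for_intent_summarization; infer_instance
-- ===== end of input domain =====

-- B replaces A's single accumulate-with-continue/break loop by a two-pass decomposition: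
-- truncate at the '**Previous Discussions' boundary first, then filter out '**Other Players**:' lines.


-- ===== PORT A =====
-- A's loop: continue on '**Other Players**:', break on '**Previous Discussions' (if not inc), else append.
def mcLoopA (inc : Bool) : List String → List String → List String
  | rs, [] => rs
  | rs, line :: rest =>
    if PySem.Str.startswith line "**Other Players**:" then mcLoopA inc rs rest
    else if !inc && PySem.Str.startswith line "**Previous Discussions" then rs
    else mcLoopA inc (rs ++ [line]) rest

def min_context_for_intent_summarization (context : String) (inc_discussion : Bool) : String :=
  let lines := (PySem.Str.split? context "\n").getD []   -- sep "\n" ≠ "", so split? is some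
  PySem.Str.join "\n" (mcLoopA inc_discussion [] lines)

-- ===== PORT B =====
-- B's first pass: the prefix of the lines before the first '**Previous Discussions' line.
def mcPrefixB : List String → List String
  | [] => []
  | l :: rest =>
    if PySem.Str.startswith l "**Previous Discussions" then []
    else l :: mcPrefixB rest

def min_context_for_intent_summarization_alt (context : String) (inc_discussion : Bool) : String :=
  let lines := (PySem.Str.split? context "\n").getD []   -- sep "\n" ≠ "", so split? is some
  let kept := if inc_discussion then lines else mcPrefixB lines
  PySem.Str.join "\n" (kept.filter (fun l => !PySem.Str.startswith l "**Other Players**:"))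

-- ===== PRECONDITION & SPEC =====
def Spec_min_context_for_intent_summarization (context : String) (inc_discussion : Bool) (out : String) : Prop := out = min_context_for_intent_summarization_alt context inc_discussion
instance (context : String) (inc_discussion : Bool) (out : String) : Decidable (Spec_min_context_for_intent_summarization context inc_discussion out) := by unfold Spec_min_context_for_intent_summarization; infer_instance

-- ===== CLAIM (what is proved, stated in full; the proofs are below) =====
def Claim_equal_min_context_for_intent_summarization : Prop := ∀ (context : String) (inc_discussion : Bool), Dom_min_context_for_intent_summarization context inc_discussion → Spec_min_context_for_intent_summarization context inc_discussion (min_context_for_intent_summarization context inc_discussion)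

-- ===== LEMMAS AND PROOFS =====

-- No line can start with both markers (they differ at index 2: 'O' vs 'P').
theorem mc_not_both (l : String) (h : PySem.Str.startswith l "**Other Players**:" = true) :
    PySem.Str.startswith l "**Previous Discussions" = false := by
  by_contra hc
  rw [Bool.not_eq_false] at hc
  rw [PySem.Str.startswith_eq, PySem.Chars.startswith_iff] at h hc
  have e1 := h.getElem (i := 2) (by decide)
  have e2 := hc.getElem (i := 2) (by decide)
  exact absurd (e1.trans e2.symm) (by decide)

theorem mcLoopA_eq (inc : Bool) (lines : List String) : ∀ rs : List String,
    mcLoopA inc rs lines =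
      rs ++ ((if inc then lines else mcPrefixB lines).filter
        (fun l => !PySem.Str.startswith l "**Other Players**:")) := by
  induction lines with
  | nil => intro rs; cases inc <;> simp [mcLoopA, mcPrefixB]
  | cons l rest ih =>
    intro rs
    by_cases hO : PySem.Str.startswith l "**Other Players**:" = true
    · have hP := mc_not_both l hO
      cases inc <;> simp [mcLoopA, mcPrefixB, hO, hP, ih, -PySem.Str.startswith_eq]
    · by_cases hP : PySem.Str.startswith l "**Previous Discussions" = true
      · cases inc <;> simp [mcLoopA, mcPrefixB, hO, hP, ih, -PySem.Str.startswith_eq]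
      · cases inc <;> simp [mcLoopA, mcPrefixB, hO, hP, ih, -PySem.Str.startswith_eq]

-- ===== VERDICT (by name: the statement is the Claim_ definition above) =====
theorem min_context_for_intent_summarization_spec : Claim_equal_min_context_for_intent_summarization := by
  intro context inc _
  unfold Spec_min_context_for_intent_summarization
  simp [min_context_for_intent_summarization, min_context_for_intent_summarization_alt,
    mcLoopA_eq, -PySem.Str.startswith_eq]
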